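-- pv_equiv track=rewrite | github.com/tommytang2414/ccsp-quiz | vps_api/add_full_explanations.py | build_entry
-- ===== SOURCE A (Python) =====
-- def js_esc(s):
--     s = s.replace('\\', '\\\\')
--     s = s.replace('"', '\\"')
--     s = s.replace('\n', ' ')
--     s = s.replace('\r', '')
--     return s
--
-- def build_entry(qid, text, opts, answer, explanation):
--     opts_str = '", "'.join(js_esc(o) for o in opts)
--     return (
--         '  {{\n'
--         '    id: {},\n'
--         '    text: "{}",\n'
--         '    options: ["{}"],\n'
--         '    answer: {},\n'
--         '    explanation: "{}",\n'
--         '  }},'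
--     ).format(qid, js_esc(text), opts_str, answer, js_esc(explanation.strip()))
-- ===== SOURCE B (Python) =====
-- def build_entry(qid, text, opts, answer, explanation):
--     def esc(s):
--         buf = []
--         for ch in s:
--             if ch == '\\':
--                 buf.append('\\\\')
--             elif ch == '"':
--                 buf.append('\\"')
--             elif ch == '\n':
--                 buf.append(' ')
--             elif ch == '\r':
--                 pass
--             else:
--                 buf.append(ch)
--         return ''.join(buf)
--     return ''.join([
--         '  {\n    id: ', str(qid),
--         ',\n    text: "', esc(text),
--         '",\n    options: ["', '", "'.join(esc(o) for o in opts),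
--         '"],\n    answer: ', str(answer),
--         ',\n    explanation: "', esc(explanation.strip()),
--         '",\n  },'])
-- ===== Notes on version B (the rewrite author's own statement) =====
-- stated objective: alternative
-- what changed: js_esc's four sequential full-string replace passes become one left-to-right scan that appends each character's escape to a buffer, and the entry is assembled by joining a parts list instead of a .format template.
import Mathlib
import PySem

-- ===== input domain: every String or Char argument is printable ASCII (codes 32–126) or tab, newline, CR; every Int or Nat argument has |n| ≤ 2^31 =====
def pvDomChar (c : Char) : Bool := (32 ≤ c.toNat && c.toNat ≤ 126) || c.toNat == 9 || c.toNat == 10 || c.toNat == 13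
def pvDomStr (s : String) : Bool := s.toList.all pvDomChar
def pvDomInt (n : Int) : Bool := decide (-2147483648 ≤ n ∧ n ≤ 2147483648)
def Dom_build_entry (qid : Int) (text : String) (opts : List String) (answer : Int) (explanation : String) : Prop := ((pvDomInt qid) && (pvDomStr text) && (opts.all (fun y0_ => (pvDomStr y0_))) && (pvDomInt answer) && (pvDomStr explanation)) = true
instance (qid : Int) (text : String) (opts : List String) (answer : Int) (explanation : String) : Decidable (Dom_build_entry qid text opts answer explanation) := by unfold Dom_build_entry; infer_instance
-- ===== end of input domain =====

-- B replaces A's four sequential full-string .replace passes with one left-to-right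
-- scan emitting each character's escape, and builds the entry by joining a parts list
-- instead of .format (objective: alternative decomposition, same cost).

-- ===== PORT A =====
def js_esc (s : String) : String :=
  let s1 := PySem.Str.replace s "\\" "\\\\"
  let s2 := PySem.Str.replace s1 "\"" "\\\""
  let s3 := PySem.Str.replace s2 "\n" " "
  PySem.Str.replace s3 "\r" ""

def build_entry (qid : Int) (text : String) (opts : List String) (answer : Int) (explanation : String) : String :=
  let opts_str := PySem.Str.join "\", \"" (opts.map js_esc)
  "  {\n    id: " ++ PySem.Int.toStr qid
    ++ ",\n    text: \"" ++ js_esc text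
    ++ "\",\n    options: [\"" ++ opts_str
    ++ "\"],\n    answer: " ++ PySem.Int.toStr answer
    ++ ",\n    explanation: \"" ++ js_esc (PySem.Str.strip explanation)
    ++ "\",\n  },"

-- ===== PORT B =====
-- single-pass escaper: per-character replacement appended to a buffer
def pvEscChar (c : Char) : List Char :=
  if c = '\\' then ['\\', '\\']
  else if c = '"' then ['\\', '"']
  else if c = '\n' then [' ']
  else if c = '\r' then []
  else [c]

def pvEsc (s : String) : String :=
  String.ofList (s.toList.foldl (fun buf c => buf ++ pvEscChar c) [])

def build_entry_alt (qid : Int) (text : String) (opts : List String) (answer : Int) (explanation : String) : String :=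
  PySem.Str.join "" [
    "  {\n    id: ", PySem.Int.toStr qid,
    ",\n    text: \"", pvEsc text,
    "\",\n    options: [\"", PySem.Str.join "\", \"" (opts.map pvEsc),
    "\"],\n    answer: ", PySem.Int.toStr answer,
    ",\n    explanation: \"", pvEsc (PySem.Str.strip explanation),
    "\",\n  },"]

-- ===== PRECONDITION & SPEC =====
def Spec_build_entry (qid : Int) (text : String) (opts : List String) (answer : Int) (explanation : String) (out : String) : Prop := out = build_entry_alt qid text opts answer explanation
instance (qid : Int) (text : String) (opts : List String) (answer : Int) (explanation : String) (out : String) : Decidable (Spec_build_entry qid text opts answer explanation out) := by unfold Spec_build_entry; infer_instance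

-- ===== CLAIM (what is proved, stated in full; the proofs are below) =====
def Claim_equal_build_entry : Prop := ∀ (qid : Int) (text : String) (opts : List String) (answer : Int) (explanation : String), Dom_build_entry qid text opts answer explanation → Spec_build_entry qid text opts answer explanation (build_entry qid text opts answer explanation)

-- ===== LEMMAS AND PROOFS =====

-- the fueled replace loop, for a single-character pattern, is a flatMap
theorem pv_go_single (o : Char) (r : List Char) : ∀ (fuel : Nat) (l acc : List Char), l.length ≤ fuel →
    PySem.Chars.replace.go [o] r fuel l acc = acc.reverse ++ l.flatMap (fun c => if c = o then r else [c]) := by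
  intro fuel
  induction fuel with
  | zero => intro l acc h; simp at h; subst h; simp [PySem.Chars.replace.go]
  | succ n ih =>
    intro l acc h
    cases l with
    | nil => simp [PySem.Chars.replace.go]
    | cons c t =>
      have ht : t.length ≤ n := by simpa using Nat.le_of_succ_le_succ h
      rw [PySem.Chars.replace.go]
      by_cases hc : c = o
      · subst hc
        have hp : List.isPrefixOf [c] (c :: t) = true := by simp [List.isPrefixOf]
        rw [if_pos hp]
        simp only [List.length_cons, List.length_nil, List.drop_succ_cons, List.drop_zero,
          Nat.zero_add]
        rw [ih _ _ ht]
        simp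
      · have hp : List.isPrefixOf [o] (c :: t) = true ↔ False := by
          simp [List.isPrefixOf]; exact fun hh => absurd hh.symm hc
        rw [if_neg (by simp [hp]), ih _ _ ht]
        simp [hc]

theorem pv_replace_single (s : List Char) (o : Char) (r : List Char) :
    PySem.Chars.replace s [o] r = s.flatMap (fun c => if c = o then r else [c]) := by
  rw [PySem.Chars.replace]
  simp only [List.isEmpty_iff, reduceCtorEq, if_false]
  exact pv_go_single o r s.length s [] (le_refl _)

-- A's four replace passes compose to the per-character escape map
theorem pv_chain_eq (l : List Char) :
    PySem.Chars.replace (PySem.Chars.replace (PySem.Chars.replace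
      (PySem.Chars.replace l ['\\'] ['\\', '\\']) ['"'] ['\\', '"']) ['\n'] [' ']) ['\r'] []
      = l.flatMap pvEscChar := by
  simp only [pv_replace_single, List.flatMap_assoc]
  apply List.flatMap_congr
  intro c _
  by_cases h1 : c = '\\'
  · subst h1; decide
  by_cases h2 : c = '"'
  · subst h2; decide
  by_cases h3 : c = '\n'
  · subst h3; decide
  by_cases h4 : c = '\r'
  · subst h4; decide
  simp [pvEscChar, h1, h2, h3, h4]

theorem pv_jsesc_eq (s : String) : js_esc s = pvEsc s := by
  unfold js_esc pvEsc
  rw [PySem.List.foldl_append_eq_flatMap]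
  simp only [PySem.Str.replace, String.toList_ofList]
  exact congrArg String.ofList (pv_chain_eq s.toList)

-- joining with the empty separator is flattening
theorem pv_intercalate_nil (cs : List (List Char)) : List.intercalate ([] : List Char) cs = cs.flatten := by
  induction cs with
  | nil => rfl
  | cons h t ih =>
    cases t with
    | nil => simp [List.intercalate]
    | cons h2 t2 =>
      simp only [List.intercalate, List.intersperse] at ih ⊢
      simp_all

theorem pv_join_empty (xs : List String) :
    PySem.Str.join "" xs = String.ofList (xs.map String.toList).flatten := by
  rw [PySem.Str.join]
  exact congrArg String.ofList (pv_intercalate_nil _)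

-- ===== VERDICT (by name: the statement is the Claim_ definition above) =====
theorem build_entry_spec : Claim_equal_build_entry := by
  intro qid text opts answer explanation _
  unfold Spec_build_entry build_entry build_entry_alt
  apply String.toList_inj.mp
  rw [pv_join_empty]
  simp [String.toList_append, String.toList_ofList, pv_jsesc_eq, List.append_assoc]
  have hfun : (String.toList ∘ js_esc) = (String.toList ∘ pvEsc) :=
    funext fun s => congrArg String.toList (pv_jsesc_eq s)
  rw [hfun]
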